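-- pv_equiv track=rewrite | github.com/avellino/trump-litigation-tracker | src/04_enrich_metadata.py | parse_court_type
-- ===== SOURCE A (Python) =====
-- from typing import Optional
--
-- def parse_court_type(court_name: Optional[str]) -> Optional[str]:
--     """Determine court type from court name string."""
--     if not court_name:
--         return None
--
--     court_lower = court_name.lower()
--
--     if "supreme" in court_lower:
--         return "supreme"
--     elif "circuit" in court_lower or "court of appeals" in court_lower:
--         return "circuit"
--     elif any(x in court_lower for x in [
--         "district", "d.", "s.d.", "n.d.", "e.d.", "m.d.", "c.d.", "w.d."
--     ]):
--         return "district"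
--     elif "bankruptcy" in court_lower:
--         return "bankruptcy"
--
--     return "unknown"
-- ===== SOURCE B (Python) =====
-- from typing import Optional
--
-- # One left-to-right scan over the lowered string: at each position, check which
-- # ranked keywords start there and keep the minimum (best-priority) rank seen.
-- # "d." is a substring of "s.d.", "n.d.", "e.d.", "m.d.", "c.d.", "w.d.", so the
-- # single keyword "d." covers A's whole dotted-district list.
-- _KEYWORDS = [
--     ("supreme", 0),
--     ("circuit", 1),
--     ("court of appeals", 1),
--     ("district", 2),
--     ("d.", 2),
--     ("bankruptcy", 3),
-- ]
-- _LABELS = ["supreme", "circuit", "district", "bankruptcy", "unknown"]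
--
-- def parse_court_type(court_name: Optional[str]) -> Optional[str]:
--     """Determine court type from court name string."""
--     if not court_name:
--         return None
--     s = court_name.lower()
--     best = 4
--     for i in range(len(s)):
--         for kw, rank in _KEYWORDS:
--             if rank < best and s.startswith(kw, i):
--                 best = rank
--     return _LABELS[best]
-- ===== Notes on version B (the rewrite author's own statement) =====
-- stated objective: alternative
-- what changed: Replaces A's cascade of independent substring searches by a single left-to-right positional scan that checks which ranked keywords start at each index and keeps the minimum rank, mapping the final rank to its label; the six dotted district abbreviations collapse to the single keyword 'd.'.
import Mathlib
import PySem

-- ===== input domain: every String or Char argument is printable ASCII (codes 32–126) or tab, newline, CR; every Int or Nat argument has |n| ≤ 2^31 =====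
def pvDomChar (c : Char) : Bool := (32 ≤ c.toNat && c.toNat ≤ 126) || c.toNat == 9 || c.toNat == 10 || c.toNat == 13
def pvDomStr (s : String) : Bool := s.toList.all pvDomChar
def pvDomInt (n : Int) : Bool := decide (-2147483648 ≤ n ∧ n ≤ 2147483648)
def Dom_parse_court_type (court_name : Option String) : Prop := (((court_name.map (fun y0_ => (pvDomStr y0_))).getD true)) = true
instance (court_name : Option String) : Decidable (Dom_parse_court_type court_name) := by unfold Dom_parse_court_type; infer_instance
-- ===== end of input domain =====

-- B replaces A's cascade of substring searches by one positional scan keeping the minimum keyword rank (alternative decomposition; same behaviour).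
-- ===== PORT A =====
def parse_court_type (court_name : Option String) : Option String :=
  match court_name with
  | none => none
  | some s =>
    if s = "" then none
    else
      let court_lower := PySem.Str.lower s
      if PySem.Str.isIn "supreme" court_lower then some "supreme"
      else if PySem.Str.isIn "circuit" court_lower || PySem.Str.isIn "court of appeals" court_lower then some "circuit"
      else if (["district", "d.", "s.d.", "n.d.", "e.d.", "m.d.", "c.d.", "w.d."].any
                 (fun x => PySem.Str.isIn x court_lower)) then some "district"
      else if PySem.Str.isIn "bankruptcy" court_lower then some "bankruptcy"
      else some "unknown"

-- ===== PORT B =====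
def kwRanks : List (List Char × Nat) :=
  [("supreme".toList, 0), ("circuit".toList, 1), ("court of appeals".toList, 1),
   ("district".toList, 2), ("d.".toList, 2), ("bankruptcy".toList, 3)]

def courtLabels : List String := ["supreme", "circuit", "district", "bankruptcy", "unknown"]

-- inner loop of B: update 'best' with every keyword that starts at position i (s.startswith(kw, i))
def scanStep (cs : List Char) (best : Nat) (i : Int) : Nat :=
  kwRanks.foldl
    (fun b p => if p.2 < b ∧ PySem.Chars.startswith (cs.drop i.toNat) p.1 then p.2 else b) best

def parse_court_type_alt (court_name : Option String) : Option String :=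
  match court_name with
  | none => none
  | some s =>
    if s = "" then none
    else
      let cs := PySem.Chars.lower s.toList
      let best := (PySem.List.pyRange 0 cs.length 1).foldl (scanStep cs) 4
      some (courtLabels.getD best "unknown")

-- ===== PRECONDITION & SPEC =====
def Spec_parse_court_type (court_name : Option String) (out : Option String) : Prop := out = parse_court_type_alt court_name
instance (court_name : Option String) (out : Option String) : Decidable (Spec_parse_court_type court_name out) := by unfold Spec_parse_court_type; infer_instance

-- ===== CLAIM (what is proved, stated in full; the proofs are below) =====
def Claim_equal_parse_court_type : Prop := ∀ (court_name : Option String), Dom_parse_court_type court_name → Spec_parse_court_type court_name (parse_court_type court_name)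

-- ===== LEMMAS AND PROOFS =====

-- the rank B's inner loop leaves when started from anything ≥ 4 at position i
def wRank (cs : List Char) (i : Int) : Nat :=
  if PySem.Chars.startswith (cs.drop i.toNat) "supreme".toList then 0
  else if PySem.Chars.startswith (cs.drop i.toNat) "circuit".toList ∨
          PySem.Chars.startswith (cs.drop i.toNat) "court of appeals".toList then 1
  else if PySem.Chars.startswith (cs.drop i.toNat) "district".toList ∨
          PySem.Chars.startswith (cs.drop i.toNat) "d.".toList then 2
  else if PySem.Chars.startswith (cs.drop i.toNat) "bankruptcy".toList then 3
  else 4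

lemma scanStep_min (cs : List Char) (b : Nat) (i : Int) (hb : b ≤ 4) :
    scanStep cs b i = min b (wRank cs i) := by
  unfold scanStep wRank
  simp only [kwRanks, List.foldl]
  generalize PySem.Chars.startswith (cs.drop i.toNat) "supreme".toList = b1
  generalize PySem.Chars.startswith (cs.drop i.toNat) "circuit".toList = b2
  generalize PySem.Chars.startswith (cs.drop i.toNat) "court of appeals".toList = b3
  generalize PySem.Chars.startswith (cs.drop i.toNat) "district".toList = b4
  generalize PySem.Chars.startswith (cs.drop i.toNat) "d.".toList = b5
  generalize PySem.Chars.startswith (cs.drop i.toNat) "bankruptcy".toList = b6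
  cases b1 <;> cases b2 <;> cases b3 <;> cases b4 <;> cases b5 <;> cases b6 <;>
    simp <;> (try split_ifs) <;> omega

lemma foldl_scan_le_init (cs : List Char) (l : List Int) (b0 : Nat) (hb : b0 ≤ 4) :
    l.foldl (scanStep cs) b0 ≤ b0 := by
  induction l generalizing b0 with
  | nil => exact le_rfl
  | cons a t ih =>
    simp only [List.foldl_cons, scanStep_min cs b0 a hb]
    exact le_trans (ih _ (le_trans (min_le_left _ _) hb)) (min_le_left _ _)

lemma foldl_scan_ge (cs : List Char) (l : List Int) (k b0 : Nat)
    (hb4 : b0 ≤ 4) (hb : k ≤ b0) (h : ∀ i ∈ l, k ≤ wRank cs i) :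
    k ≤ l.foldl (scanStep cs) b0 := by
  induction l generalizing b0 with
  | nil => exact hb
  | cons a t ih =>
    simp only [List.foldl_cons, scanStep_min cs b0 a hb4]
    exact ih _ (le_trans (min_le_left _ _) hb4)
      (le_min hb (h a (by simp))) (fun i hi => h i (by simp [hi]))

lemma foldl_scan_le (cs : List Char) (l : List Int) (b0 : Nat) (i : Int)
    (hb : b0 ≤ 4) (hi : i ∈ l) : l.foldl (scanStep cs) b0 ≤ wRank cs i := by
  induction l generalizing b0 with
  | nil => cases hi
  | cons a t ih =>
    simp only [List.foldl_cons, scanStep_min cs b0 a hb]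
    rcases List.mem_cons.mp hi with h | h
    · subst h
      exact le_trans (foldl_scan_le_init cs t _ (le_trans (min_le_left _ _) hb))
        (min_le_right _ _)
    · exact ih _ (le_trans (min_le_left _ _) hb) h

lemma foldl_scan_val (cs : List Char) (l : List Int) (k : Nat)
    (hb : k ≤ 4) (hex : ∃ i ∈ l, wRank cs i = k) (hall : ∀ i ∈ l, k ≤ wRank cs i) :
    l.foldl (scanStep cs) 4 = k := by
  obtain ⟨i, hi, hw⟩ := hex
  exact le_antisymm (hw ▸ foldl_scan_le cs l 4 i le_rfl hi)
    (foldl_scan_ge cs l k 4 le_rfl hb hall)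

-- a nonempty keyword occurs as a substring iff it starts at some scanned position
lemma exists_pos_iff_isIn (cs kw : List Char) (hk : kw ≠ []) :
    (∃ i ∈ PySem.List.pyRange 0 cs.length 1,
        PySem.Chars.startswith (cs.drop i.toNat) kw = true) ↔
      PySem.Chars.isIn kw cs = true := by
  rw [← PySem.Chars.exists_prefix_drop_iff_isIn]
  constructor
  · rintro ⟨i, _, hsw⟩
    exact ⟨i.toNat, (PySem.Chars.startswith_iff _ _).mp hsw⟩
  · rintro ⟨j, hp⟩
    have hj : j < cs.length := by
      by_contra h
      rw [List.drop_eq_nil_of_le (by omega)] at hp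
      exact hk (List.prefix_nil.mp hp)
    refine ⟨(j : Int), ?_, ?_⟩
    · rw [PySem.List.mem_pyRange_one]; omega
    · simpa using (PySem.Chars.startswith_iff _ _).mpr hp

-- every dotted abbreviation in A's list contains "d."
lemma isIn_d_of_isIn (cs sub : List Char) (hsub : PySem.Chars.isIn "d.".toList sub = true)
    (h : PySem.Chars.isIn sub cs = true) : PySem.Chars.isIn "d.".toList cs = true := by
  rw [PySem.Chars.isIn_iff_infix] at *
  exact hsub.trans h

lemma wRank_eq_zero (cs : List Char) (i : Int)
    (h : PySem.Chars.startswith (cs.drop i.toNat) "supreme".toList = true) :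
    wRank cs i = 0 := by unfold wRank; simp_all

lemma one_le_wRank (cs : List Char) (i : Int)
    (h : PySem.Chars.startswith (cs.drop i.toNat) "supreme".toList = false) :
    1 ≤ wRank cs i := by unfold wRank; simp_all; split_ifs <;> omega

lemma wRank_eq_one (cs : List Char) (i : Int)
    (h0 : PySem.Chars.startswith (cs.drop i.toNat) "supreme".toList = false)
    (h : PySem.Chars.startswith (cs.drop i.toNat) "circuit".toList = true ∨
         PySem.Chars.startswith (cs.drop i.toNat) "court of appeals".toList = true) :
    wRank cs i = 1 := by unfold wRank; rcases h with h | h <;> simp_all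

lemma two_le_wRank (cs : List Char) (i : Int)
    (h0 : PySem.Chars.startswith (cs.drop i.toNat) "supreme".toList = false)
    (h1 : PySem.Chars.startswith (cs.drop i.toNat) "circuit".toList = false)
    (h2 : PySem.Chars.startswith (cs.drop i.toNat) "court of appeals".toList = false) :
    2 ≤ wRank cs i := by unfold wRank; simp_all; split_ifs <;> omega

lemma wRank_eq_two (cs : List Char) (i : Int)
    (h0 : PySem.Chars.startswith (cs.drop i.toNat) "supreme".toList = false)
    (h1 : PySem.Chars.startswith (cs.drop i.toNat) "circuit".toList = false)
    (h2 : PySem.Chars.startswith (cs.drop i.toNat) "court of appeals".toList = false)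
    (h : PySem.Chars.startswith (cs.drop i.toNat) "district".toList = true ∨
         PySem.Chars.startswith (cs.drop i.toNat) "d.".toList = true) :
    wRank cs i = 2 := by unfold wRank; rcases h with h | h <;> simp_all

lemma three_le_wRank (cs : List Char) (i : Int)
    (h0 : PySem.Chars.startswith (cs.drop i.toNat) "supreme".toList = false)
    (h1 : PySem.Chars.startswith (cs.drop i.toNat) "circuit".toList = false)
    (h2 : PySem.Chars.startswith (cs.drop i.toNat) "court of appeals".toList = false)
    (h3 : PySem.Chars.startswith (cs.drop i.toNat) "district".toList = false)
    (h4 : PySem.Chars.startswith (cs.drop i.toNat) "d.".toList = false) :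
    3 ≤ wRank cs i := by unfold wRank; simp_all; split_ifs <;> omega

lemma wRank_eq_three (cs : List Char) (i : Int)
    (h0 : PySem.Chars.startswith (cs.drop i.toNat) "supreme".toList = false)
    (h1 : PySem.Chars.startswith (cs.drop i.toNat) "circuit".toList = false)
    (h2 : PySem.Chars.startswith (cs.drop i.toNat) "court of appeals".toList = false)
    (h3 : PySem.Chars.startswith (cs.drop i.toNat) "district".toList = false)
    (h4 : PySem.Chars.startswith (cs.drop i.toNat) "d.".toList = false)
    (h : PySem.Chars.startswith (cs.drop i.toNat) "bankruptcy".toList = true) :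
    wRank cs i = 3 := by unfold wRank; simp_all

lemma wRank_eq_four (cs : List Char) (i : Int)
    (h0 : PySem.Chars.startswith (cs.drop i.toNat) "supreme".toList = false)
    (h1 : PySem.Chars.startswith (cs.drop i.toNat) "circuit".toList = false)
    (h2 : PySem.Chars.startswith (cs.drop i.toNat) "court of appeals".toList = false)
    (h3 : PySem.Chars.startswith (cs.drop i.toNat) "district".toList = false)
    (h4 : PySem.Chars.startswith (cs.drop i.toNat) "d.".toList = false)
    (h5 : PySem.Chars.startswith (cs.drop i.toNat) "bankruptcy".toList = false) :
    wRank cs i = 4 := by unfold wRank; simp_all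

-- turn ¬ isIn into a pointwise statement over the scanned positions
lemma all_not_sw_of_not_isIn (cs kw : List Char) (hk : kw ≠ [])
    (h : ¬ PySem.Chars.isIn kw cs = true) :
    ∀ i ∈ PySem.List.pyRange 0 cs.length 1,
      PySem.Chars.startswith (cs.drop i.toNat) kw = false := by
  intro i hi
  by_contra hne
  exact h ((exists_pos_iff_isIn cs kw hk).mp ⟨i, hi, by simpa using hne⟩)

-- ===== VERDICT (by name: the statement is the Claim_ definition above) =====
theorem parse_court_type_spec : Claim_equal_parse_court_type := by
  intro court_name _
  unfold Spec_parse_court_type parse_court_type parse_court_type_alt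
  cases court_name with
  | none => rfl
  | some s =>
    by_cases hs : s = ""
    · simp [hs]
    · simp only [hs, if_false]
      have htl : (PySem.Str.lower s).toList = PySem.Chars.lower s.toList := by
        simp [PySem.Str.lower]
      set cs := PySem.Chars.lower s.toList with hcs
      have hbridge : ∀ sub : String, PySem.Str.isIn sub (PySem.Str.lower s) =
          PySem.Chars.isIn sub.toList cs := by
        intro sub
        simp [PySem.Str.isIn_eq, htl]
      simp only [hbridge]
      set R := PySem.List.pyRange 0 cs.length 1 with hR
      by_cases hS : PySem.Chars.isIn "supreme".toList cs = true
      · obtain ⟨i, hi, hsw⟩ := (exists_pos_iff_isIn cs _ (by decide)).mpr hS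
        rw [foldl_scan_val cs R 0 (by omega)
              ⟨i, hi, wRank_eq_zero cs i hsw⟩ (fun _ _ => Nat.zero_le _)]
        simp_all [courtLabels]
      · have nS := all_not_sw_of_not_isIn cs _ (by decide) hS
        by_cases hCO : PySem.Chars.isIn "circuit".toList cs = true ∨
            PySem.Chars.isIn "court of appeals".toList cs = true
        · obtain ⟨i, hi, hsw⟩ : ∃ i ∈ R,
              PySem.Chars.startswith (cs.drop i.toNat) "circuit".toList = true ∨
              PySem.Chars.startswith (cs.drop i.toNat) "court of appeals".toList = true := by
            rcases hCO with h | h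
            · obtain ⟨i, hi, hsw⟩ := (exists_pos_iff_isIn cs _ (by decide)).mpr h
              exact ⟨i, hi, Or.inl hsw⟩
            · obtain ⟨i, hi, hsw⟩ := (exists_pos_iff_isIn cs _ (by decide)).mpr h
              exact ⟨i, hi, Or.inr hsw⟩
          rw [foldl_scan_val cs R 1 (by omega)
                ⟨i, hi, wRank_eq_one cs i (nS i hi) hsw⟩
                (fun j hj => one_le_wRank cs j (nS j hj))]
          rcases hCO with h | h <;> simp_all [courtLabels]
        · push_neg at hCO
          obtain ⟨hC, hO⟩ := hCO
          have nC := all_not_sw_of_not_isIn cs _ (by decide) hC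
          have nO := all_not_sw_of_not_isIn cs _ (by decide) hO
          simp only [Bool.not_eq_true] at hC hO
          by_cases hDd : PySem.Chars.isIn "district".toList cs = true ∨
              PySem.Chars.isIn "d.".toList cs = true
          · obtain ⟨i, hi, hsw⟩ : ∃ i ∈ R,
                PySem.Chars.startswith (cs.drop i.toNat) "district".toList = true ∨
                PySem.Chars.startswith (cs.drop i.toNat) "d.".toList = true := by
              rcases hDd with h | h
              · obtain ⟨i, hi, hsw⟩ := (exists_pos_iff_isIn cs _ (by decide)).mpr h
                exact ⟨i, hi, Or.inl hsw⟩
              · obtain ⟨i, hi, hsw⟩ := (exists_pos_iff_isIn cs _ (by decide)).mpr h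
                exact ⟨i, hi, Or.inr hsw⟩
            rw [foldl_scan_val cs R 2 (by omega)
                  ⟨i, hi, wRank_eq_two cs i (nS i hi) (nC i hi) (nO i hi) hsw⟩
                  (fun j hj => two_le_wRank cs j (nS j hj) (nC j hj) (nO j hj))]
            rcases hDd with h | h <;> simp_all [courtLabels]
          · push_neg at hDd
            obtain ⟨hD, hd⟩ := hDd
            have nD := all_not_sw_of_not_isIn cs _ (by decide) hD
            have nd := all_not_sw_of_not_isIn cs _ (by decide) hd
            simp only [Bool.not_eq_true] at hD hd
            have hsd : PySem.Chars.isIn "s.d.".toList cs = false := by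
              by_contra h; simp only [Bool.not_eq_false] at h
              have h2 := isIn_d_of_isIn cs _ (by decide) h
              simp_all
            have hnd : PySem.Chars.isIn "n.d.".toList cs = false := by
              by_contra h; simp only [Bool.not_eq_false] at h
              have h2 := isIn_d_of_isIn cs _ (by decide) h
              simp_all
            have hed : PySem.Chars.isIn "e.d.".toList cs = false := by
              by_contra h; simp only [Bool.not_eq_false] at h
              have h2 := isIn_d_of_isIn cs _ (by decide) h
              simp_all
            have hmd : PySem.Chars.isIn "m.d.".toList cs = false := by
              by_contra h; simp only [Bool.not_eq_false] at h
              have h2 := isIn_d_of_isIn cs _ (by decide) h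
              simp_all
            have hcd : PySem.Chars.isIn "c.d.".toList cs = false := by
              by_contra h; simp only [Bool.not_eq_false] at h
              have h2 := isIn_d_of_isIn cs _ (by decide) h
              simp_all
            have hwd : PySem.Chars.isIn "w.d.".toList cs = false := by
              by_contra h; simp only [Bool.not_eq_false] at h
              have h2 := isIn_d_of_isIn cs _ (by decide) h
              simp_all
            by_cases hB : PySem.Chars.isIn "bankruptcy".toList cs = true
            · obtain ⟨i, hi, hsw⟩ := (exists_pos_iff_isIn cs _ (by decide)).mpr hB
              rw [foldl_scan_val cs R 3 (by omega)
                    ⟨i, hi, wRank_eq_three cs i (nS i hi) (nC i hi) (nO i hi) (nD i hi) (nd i hi) hsw⟩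
                    (fun j hj => three_le_wRank cs j (nS j hj) (nC j hj) (nO j hj) (nD j hj) (nd j hj))]
              simp_all [courtLabels]
            · have nB := all_not_sw_of_not_isIn cs _ (by decide) hB
              simp only [Bool.not_eq_true] at hB
              have hall4 : ∀ j ∈ R, wRank cs j = 4 := fun j hj =>
                wRank_eq_four cs j (nS j hj) (nC j hj) (nO j hj) (nD j hj) (nd j hj) (nB j hj)
              have hfold : R.foldl (scanStep cs) 4 = 4 := by
                rcases List.eq_nil_or_concat R with hnil | ⟨t, a, hconc⟩
                · simp [hnil]
                · rw [hconc]
                  exact foldl_scan_val cs _ 4 le_rfl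
                    ⟨a, by simp, hall4 a (by rw [hconc]; simp)⟩
                    (fun j hj => le_of_eq (hall4 j (by rw [hconc]; exact hj)).symm)
              rw [hfold]
              simp_all [courtLabels]
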